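-- pv_equiv track=rewrite | github.com/dsabdrashitov/adventofcode2023 | day7/day7.py | add_rank
-- ===== SOURCE A (Python) =====
-- def add_rank(bet):
--     h = bet[0]
--     # nothing
--     rank = 0
--     # pair
--     s = sorted(h)
--     for i in range(4):
--         if s[i] == s[i + 1]:
--             rank = 1
--             break
--     # two pair
--     if (s[0] == s[1] and s[2] == s[3]) or (s[0] == s[1] and s[3] == s[4]) or (s[1] == s[2] and s[3] == s[4]):
--         rank = 2
--     # three
--     if (s[0] == s[1] == s[2]) or (s[1] == s[2] == s[3]) or (s[2] == s[3] == s[4]):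
--         rank = 3
--     # fh
--     if (s[0] == s[1] == s[2] and s[3] == s[4]) or (s[0] == s[1] and s[2] == s[3] == s[4]):
--         rank = 4
--     # four
--     if (s[0] == s[1] == s[2] == s[3]) or (s[1] == s[2] == s[3] == s[4]):
--         rank = 5
--     if s[0] == s[1] == s[2] == s[3] == s[4]:
--         rank = 6
--     result = [rank]
--     result.extend(h)
--     return result
-- ===== SOURCE B (Python) =====
-- def add_rank(bet):
--     h = bet[0]
--     s = sorted(h)
--     five = [s[0], s[1], s[2], s[3], s[4]]
--     sig = tuple(sorted((five.count(x) for x in dict.fromkeys(five)), reverse=True))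
--     rank = {(5,): 6, (4, 1): 5, (3, 2): 4, (3, 1, 1): 3,
--             (2, 2, 1): 2, (2, 1, 1, 1): 1, (1, 1, 1, 1, 1): 0}[sig]
--     return [rank] + list(h)
-- ===== Notes on version B (the rewrite author's own statement) =====
-- stated objective: idiomatic
-- what changed: A's hard-coded cascade of equality tests over the five sorted cards is replaced by counting card multiplicities over the first five sorted cards and looking the sorted count signature up in a table.
import Mathlib
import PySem

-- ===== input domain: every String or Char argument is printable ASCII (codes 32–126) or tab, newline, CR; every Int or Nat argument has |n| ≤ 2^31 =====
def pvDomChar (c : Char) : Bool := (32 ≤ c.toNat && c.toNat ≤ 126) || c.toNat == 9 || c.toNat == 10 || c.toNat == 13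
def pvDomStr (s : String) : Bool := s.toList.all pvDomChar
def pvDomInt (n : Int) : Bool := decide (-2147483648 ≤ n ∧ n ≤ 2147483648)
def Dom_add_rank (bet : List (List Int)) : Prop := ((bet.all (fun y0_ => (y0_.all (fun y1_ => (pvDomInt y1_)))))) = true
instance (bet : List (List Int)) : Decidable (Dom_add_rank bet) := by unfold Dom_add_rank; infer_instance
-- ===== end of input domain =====

-- B replaces A's cascade of hard-coded equality tests on the five sorted cards by card
-- multiplicity counts (five.count over the deduplicated cards) whose sorted signature is looked
-- up in a table (objective: idiomatic; same cost).


-- ===== PORT A =====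
-- A's rank cascade over the sorted hand s (indexing exactly as the Python does).
def rankOfA (s : List Int) : Int :=
  let rank : Int := 0
  -- for i in range(4): if s[i] == s[i+1]: rank = 1; break
  let rank := (PySem.List.pyRange 0 4 1).foldl
    (fun rank i =>
      if rank = 1 then rank
      else if PySem.List.pyGetD s i 0 = PySem.List.pyGetD s (i + 1) 0 then 1 else rank) rank
  let rank := if (PySem.List.pyGetD s 0 0 = PySem.List.pyGetD s 1 0 ∧ PySem.List.pyGetD s 2 0 = PySem.List.pyGetD s 3 0)
      ∨ (PySem.List.pyGetD s 0 0 = PySem.List.pyGetD s 1 0 ∧ PySem.List.pyGetD s 3 0 = PySem.List.pyGetD s 4 0)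
      ∨ (PySem.List.pyGetD s 1 0 = PySem.List.pyGetD s 2 0 ∧ PySem.List.pyGetD s 3 0 = PySem.List.pyGetD s 4 0) then 2 else rank
  let rank := if (PySem.List.pyGetD s 0 0 = PySem.List.pyGetD s 1 0 ∧ PySem.List.pyGetD s 1 0 = PySem.List.pyGetD s 2 0)
      ∨ (PySem.List.pyGetD s 1 0 = PySem.List.pyGetD s 2 0 ∧ PySem.List.pyGetD s 2 0 = PySem.List.pyGetD s 3 0)
      ∨ (PySem.List.pyGetD s 2 0 = PySem.List.pyGetD s 3 0 ∧ PySem.List.pyGetD s 3 0 = PySem.List.pyGetD s 4 0) then 3 else rank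
  let rank := if (PySem.List.pyGetD s 0 0 = PySem.List.pyGetD s 1 0 ∧ PySem.List.pyGetD s 1 0 = PySem.List.pyGetD s 2 0 ∧ PySem.List.pyGetD s 3 0 = PySem.List.pyGetD s 4 0)
      ∨ (PySem.List.pyGetD s 0 0 = PySem.List.pyGetD s 1 0 ∧ PySem.List.pyGetD s 2 0 = PySem.List.pyGetD s 3 0 ∧ PySem.List.pyGetD s 3 0 = PySem.List.pyGetD s 4 0) then 4 else rank
  let rank := if (PySem.List.pyGetD s 0 0 = PySem.List.pyGetD s 1 0 ∧ PySem.List.pyGetD s 1 0 = PySem.List.pyGetD s 2 0 ∧ PySem.List.pyGetD s 2 0 = PySem.List.pyGetD s 3 0)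
      ∨ (PySem.List.pyGetD s 1 0 = PySem.List.pyGetD s 2 0 ∧ PySem.List.pyGetD s 2 0 = PySem.List.pyGetD s 3 0 ∧ PySem.List.pyGetD s 3 0 = PySem.List.pyGetD s 4 0) then 5 else rank
  let rank := if PySem.List.pyGetD s 0 0 = PySem.List.pyGetD s 1 0 ∧ PySem.List.pyGetD s 1 0 = PySem.List.pyGetD s 2 0 ∧ PySem.List.pyGetD s 2 0 = PySem.List.pyGetD s 3 0 ∧ PySem.List.pyGetD s 3 0 = PySem.List.pyGetD s 4 0 then 6 else rank
  rank

def add_rank (bet : List (List Int)) : List Int :=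
  match bet with
  | [] => []  -- bet[0] raises IndexError; excluded by Pre_
  | h :: _ =>
    let s := PySem.List.sorted h (fun x => x) false
    rankOfA s :: h  -- result = [rank]; result.extend(h)

-- ===== PORT B =====
def rankTable : List (List Int × Int) :=
  [([5], 6), ([4, 1], 5), ([3, 2], 4), ([3, 1, 1], 3), ([2, 2, 1], 2), ([2, 1, 1, 1], 1), ([1, 1, 1, 1, 1], 0)]

-- sorted (reverse) multiplicities of the five cards (five.count(x) for x in dict.fromkeys(five)),
-- looked up in the signature table.
def rankOfB (five : List Int) : Int :=
  let sig := PySem.List.sorted ((PySem.List.dedup five).map (fun x => (five.count x : Int))) (fun x => x) true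
  (PySem.Dict.ofList rankTable).getD sig 0  -- inside Pre_ the signature is always in the table

def add_rank_alt (bet : List (List Int)) : List Int :=
  match bet with
  | [] => []  -- bet[0] raises IndexError; excluded by Pre_
  | h :: _ =>
    let s := PySem.List.sorted h (fun x => x) false
    let five := [PySem.List.pyGetD s 0 0, PySem.List.pyGetD s 1 0, PySem.List.pyGetD s 2 0,
                 PySem.List.pyGetD s 3 0, PySem.List.pyGetD s 4 0]
    rankOfB five :: h

-- ===== PRECONDITION & SPEC =====
-- Pre_ excludes exactly the inputs where A raises IndexError: an empty bet (bet[0]) or a hand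
-- with fewer than five cards (s[4] and friends).
def Pre_add_rank (bet : List (List Int)) : Prop := bet ≠ [] ∧ 5 ≤ (bet.headD []).length
instance (bet : List (List Int)) : Decidable (Pre_add_rank bet) := by unfold Pre_add_rank; infer_instance

def pvWitness_add_rank : List (List Int) := [[3, 1, 2, 1, 7]]

def Spec_add_rank (bet : List (List Int)) (out : List Int) : Prop := out = add_rank_alt bet
instance (bet : List (List Int)) (out : List Int) : Decidable (Spec_add_rank bet out) := by unfold Spec_add_rank; infer_instance

-- ===== CLAIM (what is proved, stated in full; the proofs are below) =====
def Claim_equal_add_rank : Prop := ∀ (bet : List (List Int)), Dom_add_rank bet → Pre_add_rank bet → Spec_add_rank bet (add_rank bet)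

-- ===== LEMMAS AND PROOFS =====
lemma core (a b c d e : Int) (rest : List Int)
    (h1 : a ≤ b) (h2 : b ≤ c) (h3 : c ≤ d) (h4 : d ≤ e) :
    rankOfA (a :: b :: c :: d :: e :: rest) = rankOfB [a, b, c, d, e] := by
  have hR : PySem.List.pyRange 0 4 1 = [0,1,2,3] := by decide
  rcases h1.lt_or_eq with h1 | h1
  · rcases h2.lt_or_eq with h2 | h2
    · rcases h3.lt_or_eq with h3 | h3
      · rcases h4.lt_or_eq with h4 | h4
        · have n01 := h1.ne
          have n02 := (h1.trans h2).ne
          have n03 := ((h1.trans h2).trans h3).ne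
          have n04 := (((h1.trans h2).trans h3).trans h4).ne
          have n12 := h2.ne
          have n13 := (h2.trans h3).ne
          have n14 := ((h2.trans h3).trans h4).ne
          have n23 := h3.ne
          have n24 := (h3.trans h4).ne
          have n34 := h4.ne
          simp only [rankOfA, hR, List.foldl]
          norm_num [rankOfB, rankTable, PySem.List.pyGetD_ofNat', PySem.List.dedup, PySem.List.sorted,
            PySem.List.insertBy, PySem.Dict.ofList, PySem.Dict.getD, PySem.Dict.get?, PySem.Dict.update,
            PySem.Dict.insert, PySem.Dict.empty, PySem.Dict.contains, List.count_cons, PySem.Set.ofList,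
            PySem.Set.add, n01, n01.symm, n02, n02.symm, n03, n03.symm, n04, n04.symm, n12, n12.symm, n13, n13.symm, n14, n14.symm, n23, n23.symm, n24, n24.symm, n34, n34.symm]
        · subst h4
          have n01 := h1.ne
          have n02 := (h1.trans h2).ne
          have n03 := ((h1.trans h2).trans h3).ne
          have n12 := h2.ne
          have n13 := (h2.trans h3).ne
          have n23 := h3.ne
          simp only [rankOfA, hR, List.foldl]
          norm_num [rankOfB, rankTable, PySem.List.pyGetD_ofNat', PySem.List.dedup, PySem.List.sorted,
            PySem.List.insertBy, PySem.Dict.ofList, PySem.Dict.getD, PySem.Dict.get?, PySem.Dict.update,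
            PySem.Dict.insert, PySem.Dict.empty, PySem.Dict.contains, List.count_cons, PySem.Set.ofList,
            PySem.Set.add, n01, n01.symm, n02, n02.symm, n03, n03.symm, n12, n12.symm, n13, n13.symm, n23, n23.symm]
      · rcases h4.lt_or_eq with h4 | h4
        · subst h3
          have n01 := h1.ne
          have n02 := (h1.trans h2).ne
          have n03 := ((h1.trans h2).trans h4).ne
          have n12 := h2.ne
          have n13 := (h2.trans h4).ne
          have n23 := h4.ne
          simp only [rankOfA, hR, List.foldl]
          norm_num [rankOfB, rankTable, PySem.List.pyGetD_ofNat', PySem.List.dedup, PySem.List.sorted,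
            PySem.List.insertBy, PySem.Dict.ofList, PySem.Dict.getD, PySem.Dict.get?, PySem.Dict.update,
            PySem.Dict.insert, PySem.Dict.empty, PySem.Dict.contains, List.count_cons, PySem.Set.ofList,
            PySem.Set.add, n01, n01.symm, n02, n02.symm, n03, n03.symm, n12, n12.symm, n13, n13.symm, n23, n23.symm]
        · subst h3
          subst h4
          have n01 := h1.ne
          have n02 := (h1.trans h2).ne
          have n12 := h2.ne
          simp only [rankOfA, hR, List.foldl]
          norm_num [rankOfB, rankTable, PySem.List.pyGetD_ofNat', PySem.List.dedup, PySem.List.sorted,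
            PySem.List.insertBy, PySem.Dict.ofList, PySem.Dict.getD, PySem.Dict.get?, PySem.Dict.update,
            PySem.Dict.insert, PySem.Dict.empty, PySem.Dict.contains, List.count_cons, PySem.Set.ofList,
            PySem.Set.add, n01, n01.symm, n02, n02.symm, n12, n12.symm]
    · rcases h3.lt_or_eq with h3 | h3
      · rcases h4.lt_or_eq with h4 | h4
        · subst h2
          have n01 := h1.ne
          have n02 := (h1.trans h3).ne
          have n03 := ((h1.trans h3).trans h4).ne
          have n12 := h3.ne
          have n13 := (h3.trans h4).ne
          have n23 := h4.ne
          simp only [rankOfA, hR, List.foldl]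
          norm_num [rankOfB, rankTable, PySem.List.pyGetD_ofNat', PySem.List.dedup, PySem.List.sorted,
            PySem.List.insertBy, PySem.Dict.ofList, PySem.Dict.getD, PySem.Dict.get?, PySem.Dict.update,
            PySem.Dict.insert, PySem.Dict.empty, PySem.Dict.contains, List.count_cons, PySem.Set.ofList,
            PySem.Set.add, n01, n01.symm, n02, n02.symm, n03, n03.symm, n12, n12.symm, n13, n13.symm, n23, n23.symm]
        · subst h2
          subst h4
          have n01 := h1.ne
          have n02 := (h1.trans h3).ne
          have n12 := h3.ne
          simp only [rankOfA, hR, List.foldl]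
          norm_num [rankOfB, rankTable, PySem.List.pyGetD_ofNat', PySem.List.dedup, PySem.List.sorted,
            PySem.List.insertBy, PySem.Dict.ofList, PySem.Dict.getD, PySem.Dict.get?, PySem.Dict.update,
            PySem.Dict.insert, PySem.Dict.empty, PySem.Dict.contains, List.count_cons, PySem.Set.ofList,
            PySem.Set.add, n01, n01.symm, n02, n02.symm, n12, n12.symm]
      · rcases h4.lt_or_eq with h4 | h4
        · subst h2
          subst h3
          have n01 := h1.ne
          have n02 := (h1.trans h4).ne
          have n12 := h4.ne
          simp only [rankOfA, hR, List.foldl]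
          norm_num [rankOfB, rankTable, PySem.List.pyGetD_ofNat', PySem.List.dedup, PySem.List.sorted,
            PySem.List.insertBy, PySem.Dict.ofList, PySem.Dict.getD, PySem.Dict.get?, PySem.Dict.update,
            PySem.Dict.insert, PySem.Dict.empty, PySem.Dict.contains, List.count_cons, PySem.Set.ofList,
            PySem.Set.add, n01, n01.symm, n02, n02.symm, n12, n12.symm]
        · subst h2
          subst h3
          subst h4
          have n01 := h1.ne
          simp only [rankOfA, hR, List.foldl]
          norm_num [rankOfB, rankTable, PySem.List.pyGetD_ofNat', PySem.List.dedup, PySem.List.sorted,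
            PySem.List.insertBy, PySem.Dict.ofList, PySem.Dict.getD, PySem.Dict.get?, PySem.Dict.update,
            PySem.Dict.insert, PySem.Dict.empty, PySem.Dict.contains, List.count_cons, PySem.Set.ofList,
            PySem.Set.add, n01, n01.symm]
  · rcases h2.lt_or_eq with h2 | h2
    · rcases h3.lt_or_eq with h3 | h3
      · rcases h4.lt_or_eq with h4 | h4
        · subst h1
          have n01 := h2.ne
          have n02 := (h2.trans h3).ne
          have n03 := ((h2.trans h3).trans h4).ne
          have n12 := h3.ne
          have n13 := (h3.trans h4).ne
          have n23 := h4.ne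
          simp only [rankOfA, hR, List.foldl]
          norm_num [rankOfB, rankTable, PySem.List.pyGetD_ofNat', PySem.List.dedup, PySem.List.sorted,
            PySem.List.insertBy, PySem.Dict.ofList, PySem.Dict.getD, PySem.Dict.get?, PySem.Dict.update,
            PySem.Dict.insert, PySem.Dict.empty, PySem.Dict.contains, List.count_cons, PySem.Set.ofList,
            PySem.Set.add, n01, n01.symm, n02, n02.symm, n03, n03.symm, n12, n12.symm, n13, n13.symm, n23, n23.symm]
        · subst h1
          subst h4
          have n01 := h2.ne
          have n02 := (h2.trans h3).ne
          have n12 := h3.ne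
          simp only [rankOfA, hR, List.foldl]
          norm_num [rankOfB, rankTable, PySem.List.pyGetD_ofNat', PySem.List.dedup, PySem.List.sorted,
            PySem.List.insertBy, PySem.Dict.ofList, PySem.Dict.getD, PySem.Dict.get?, PySem.Dict.update,
            PySem.Dict.insert, PySem.Dict.empty, PySem.Dict.contains, List.count_cons, PySem.Set.ofList,
            PySem.Set.add, n01, n01.symm, n02, n02.symm, n12, n12.symm]
      · rcases h4.lt_or_eq with h4 | h4
        · subst h1
          subst h3
          have n01 := h2.ne
          have n02 := (h2.trans h4).ne
          have n12 := h4.ne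
          simp only [rankOfA, hR, List.foldl]
          norm_num [rankOfB, rankTable, PySem.List.pyGetD_ofNat', PySem.List.dedup, PySem.List.sorted,
            PySem.List.insertBy, PySem.Dict.ofList, PySem.Dict.getD, PySem.Dict.get?, PySem.Dict.update,
            PySem.Dict.insert, PySem.Dict.empty, PySem.Dict.contains, List.count_cons, PySem.Set.ofList,
            PySem.Set.add, n01, n01.symm, n02, n02.symm, n12, n12.symm]
        · subst h1
          subst h3
          subst h4
          have n01 := h2.ne
          simp only [rankOfA, hR, List.foldl]
          norm_num [rankOfB, rankTable, PySem.List.pyGetD_ofNat', PySem.List.dedup, PySem.List.sorted,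
            PySem.List.insertBy, PySem.Dict.ofList, PySem.Dict.getD, PySem.Dict.get?, PySem.Dict.update,
            PySem.Dict.insert, PySem.Dict.empty, PySem.Dict.contains, List.count_cons, PySem.Set.ofList,
            PySem.Set.add, n01, n01.symm]
    · rcases h3.lt_or_eq with h3 | h3
      · rcases h4.lt_or_eq with h4 | h4
        · subst h1
          subst h2
          have n01 := h3.ne
          have n02 := (h3.trans h4).ne
          have n12 := h4.ne
          simp only [rankOfA, hR, List.foldl]
          norm_num [rankOfB, rankTable, PySem.List.pyGetD_ofNat', PySem.List.dedup, PySem.List.sorted,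
            PySem.List.insertBy, PySem.Dict.ofList, PySem.Dict.getD, PySem.Dict.get?, PySem.Dict.update,
            PySem.Dict.insert, PySem.Dict.empty, PySem.Dict.contains, List.count_cons, PySem.Set.ofList,
            PySem.Set.add, n01, n01.symm, n02, n02.symm, n12, n12.symm]
        · subst h1
          subst h2
          subst h4
          have n01 := h3.ne
          simp only [rankOfA, hR, List.foldl]
          norm_num [rankOfB, rankTable, PySem.List.pyGetD_ofNat', PySem.List.dedup, PySem.List.sorted,
            PySem.List.insertBy, PySem.Dict.ofList, PySem.Dict.getD, PySem.Dict.get?, PySem.Dict.update,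
            PySem.Dict.insert, PySem.Dict.empty, PySem.Dict.contains, List.count_cons, PySem.Set.ofList,
            PySem.Set.add, n01, n01.symm]
      · rcases h4.lt_or_eq with h4 | h4
        · subst h1
          subst h2
          subst h3
          have n01 := h4.ne
          simp only [rankOfA, hR, List.foldl]
          norm_num [rankOfB, rankTable, PySem.List.pyGetD_ofNat', PySem.List.dedup, PySem.List.sorted,
            PySem.List.insertBy, PySem.Dict.ofList, PySem.Dict.getD, PySem.Dict.get?, PySem.Dict.update,
            PySem.Dict.insert, PySem.Dict.empty, PySem.Dict.contains, List.count_cons, PySem.Set.ofList,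
            PySem.Set.add, n01, n01.symm]
        · subst h1
          subst h2
          subst h3
          subst h4
          simp only [rankOfA, hR, List.foldl]
          norm_num [rankOfB, rankTable, PySem.List.pyGetD_ofNat', PySem.List.dedup, PySem.List.sorted,
            PySem.List.insertBy, PySem.Dict.ofList, PySem.Dict.getD, PySem.Dict.get?, PySem.Dict.update,
            PySem.Dict.insert, PySem.Dict.empty, PySem.Dict.contains, List.count_cons, PySem.Set.ofList,
            PySem.Set.add]


-- ===== VERDICT (by name: the statement is the Claim_ definition above) =====
theorem add_rank_spec : Claim_equal_add_rank := by
  intro bet _ hpre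
  obtain ⟨hne, hlen⟩ := hpre
  rcases bet with _ | ⟨h, t⟩
  · exact absurd rfl hne
  · simp only [List.headD] at hlen
    have hp := PySem.List.sorted_pairwise (xs := h) (key := fun x => x)
    have hslen : (PySem.List.sorted h (fun x => x) false).length = h.length :=
      PySem.List.length_sorted ..
    unfold Spec_add_rank
    show add_rank (h :: t) = add_rank_alt (h :: t)
    have hA : add_rank (h :: t) = rankOfA (PySem.List.sorted h (fun x => x) false) :: h := rfl
    have hB : add_rank_alt (h :: t) =
        rankOfB [PySem.List.pyGetD (PySem.List.sorted h (fun x => x) false) 0 0,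
                 PySem.List.pyGetD (PySem.List.sorted h (fun x => x) false) 1 0,
                 PySem.List.pyGetD (PySem.List.sorted h (fun x => x) false) 2 0,
                 PySem.List.pyGetD (PySem.List.sorted h (fun x => x) false) 3 0,
                 PySem.List.pyGetD (PySem.List.sorted h (fun x => x) false) 4 0] :: h := rfl
    rw [hA, hB]
    rcases hs : PySem.List.sorted h (fun x => x) false with _ | ⟨a, _ | ⟨b, _ | ⟨c, _ | ⟨d, _ | ⟨e, rest⟩⟩⟩⟩⟩ <;>
      rw [hs] at hslen hp <;> simp at hslen <;> try omega
    simp only [List.pairwise_cons] at hp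
    have h1 : a ≤ b := hp.1 b (by simp)
    have h2 : b ≤ c := hp.2.1 c (by simp)
    have h3 : c ≤ d := hp.2.2.1 d (by simp)
    have h4 : d ≤ e := hp.2.2.2.1 e (by simp)
    have g0 : PySem.List.pyGetD (a :: b :: c :: d :: e :: rest) 0 0 = a := by simp [pysem]
    have g1 : PySem.List.pyGetD (a :: b :: c :: d :: e :: rest) 1 0 = b := by simp [pysem]
    have g2 : PySem.List.pyGetD (a :: b :: c :: d :: e :: rest) 2 0 = c := by simp [pysem]
    have g3 : PySem.List.pyGetD (a :: b :: c :: d :: e :: rest) 3 0 = d := by simp [pysem]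
    have g4 : PySem.List.pyGetD (a :: b :: c :: d :: e :: rest) 4 0 = e := by simp [pysem]
    rw [g0, g1, g2, g3, g4]
    exact congrArg (fun r => r :: h) (core a b c d e rest h1 h2 h3 h4)
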